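-- pv_equiv track=rewrite | github.com/DanielHarit/marvel-genetic-data-processor | app/services/processing.py | find_repeating_patterns
-- ===== SOURCE A (Python) =====
-- from typing import List, Dict, Tuple, Any
--
-- def find_repeating_patterns(sequence: str, min_length: int = 2) -> List[Tuple[str, int]]:
--     """Find all repeating patterns in a sequence, incrementally increasing pattern length."""
--     patterns = []
--     length = min_length
--     found = True
--
--     while found and length <= len(sequence) // 2:
--         found = False
--         seen = set()
--         counts = {}
--
--         for i in range(len(sequence) - length + 1):
--             pattern = sequence[i:i + length]
--             if pattern in seen:
--                 continue
--             seen.add(pattern)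
--             count = sequence.count(pattern)
--             if count > 1:
--                 found = True
--                 patterns.append((pattern, count))
--
--         length += 1
--
--     return patterns
-- ===== SOURCE B (Python) =====
-- from typing import List, Tuple
--
-- def find_repeating_patterns(sequence: str, min_length: int = 2) -> List[Tuple[str, int]]:
--     """One pass per length: group window start positions by substring in a dict,
--     then take the greedy non-overlapping count from each position list (no str.count scans)."""
--     patterns = []
--     n = len(sequence)
--     length = min_length
--     found = True
--
--     while found and length <= n // 2:
--         found = False
--         occ = {}
--         for i in range(n - length + 1):
--             occ.setdefault(sequence[i:i + length], []).append(i)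
--         for pattern, positions in occ.items():
--             cnt = 0
--             free = 0
--             for pos in positions:
--                 if free <= pos:
--                     cnt += 1
--                     free = pos + length
--             if cnt > 1:
--                 found = True
--                 patterns.append((pattern, cnt))
--         length += 1
--
--     return patterns
-- ===== Notes on version B (the rewrite author's own statement) =====
-- stated objective: alternative
-- what changed: Instead of calling sequence.count(pattern) (a rescan of the whole sequence) for every distinct window, B builds one dict mapping each window substring to its list of start positions in a single pass per length and derives the same non-overlapping count greedily from each position list.
-- outside the precondition, e.g. on find_repeating_patterns('', -2): A returns [], B returns [('', 3), ('', 2)]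
import Mathlib
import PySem

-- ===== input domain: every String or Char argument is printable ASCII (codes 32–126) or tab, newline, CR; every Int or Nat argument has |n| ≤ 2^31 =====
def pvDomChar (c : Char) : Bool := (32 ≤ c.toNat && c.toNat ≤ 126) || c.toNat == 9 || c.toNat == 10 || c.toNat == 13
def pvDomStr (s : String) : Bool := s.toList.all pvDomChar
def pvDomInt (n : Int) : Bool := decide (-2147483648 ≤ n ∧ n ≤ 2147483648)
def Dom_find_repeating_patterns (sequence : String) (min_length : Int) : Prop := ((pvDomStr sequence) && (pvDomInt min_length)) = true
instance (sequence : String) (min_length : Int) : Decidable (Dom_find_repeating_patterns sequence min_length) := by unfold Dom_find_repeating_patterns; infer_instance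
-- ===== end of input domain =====

-- B groups window start positions per length in one dict pass and takes the greedy
-- non-overlapping count from each position list, instead of A's str.count scan of the
-- whole sequence for every distinct window (objective: alternative).

-- ===== PORT A =====
-- body of A's inner `for i in range(...)` loop; state = (found, seen, patterns)
-- (the `counts = {}` dict in A is dead code and has no port)
def pvAInner (sequence : String) (length : Int)
    (st : Bool × PySem.Set String × List (String × Int)) (i : Int) :
    Bool × PySem.Set String × List (String × Int) :=
  let pattern := PySem.Str.slice sequence (some i) (some (i + length))
  if st.2.1.contains pattern then st
  else
    let seen := st.2.1.add pattern
    let count := PySem.Str.count sequence pattern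
    if 1 < count then (true, seen, st.2.2 ++ [(pattern, (count : Int))])
    else (st.1, seen, st.2.2)

-- A's `while found and length <= len(sequence) // 2` loop; the fuel counts the
-- remaining candidate lengths and never cuts the loop short
def pvALoop (sequence : String) : Nat → Int → Bool → List (String × Int) → List (String × Int)
  | 0, _, _, patterns => patterns
  | fuel + 1, length, found, patterns =>
    if found ∧ length ≤ PySem.Int.floordiv (PySem.Str.len sequence) 2 then
      pvALoop sequence fuel (length + 1)
        (((PySem.List.pyRange 0 (PySem.Str.len sequence - length + 1) 1).foldl
          (pvAInner sequence length) (false, PySem.Set.empty, patterns)).1)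
        (((PySem.List.pyRange 0 (PySem.Str.len sequence - length + 1) 1).foldl
          (pvAInner sequence length) (false, PySem.Set.empty, patterns)).2.2)
    else patterns

def find_repeating_patterns (sequence : String) (min_length : Int) : List (String × Int) :=
  pvALoop sequence (PySem.Int.floordiv (PySem.Str.len sequence) 2 - min_length + 1).toNat
    min_length true []

-- ===== PORT B =====
-- greedy step over one position list; state = (cnt, free)
def pvBGreedy (length : Int) (c : Int × Int) (pos : Int) : Int × Int :=
  if c.2 ≤ pos then (c.1 + 1, pos + length) else c

-- body of B's `for pattern, positions in occ.items()` loop; state = (found, patterns)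
def pvBItem (length : Int) (st : Bool × List (String × Int)) (p : String × List Int) :
    Bool × List (String × Int) :=
  let g := p.2.foldl (pvBGreedy length) (0, 0)
  if 1 < g.1 then (true, st.2 ++ [(p.1, g.1)]) else st

-- B's while loop, same fuel discipline as A's; `occ.setdefault(...).append(i)` is
-- the dict-modify idiom
def pvBLoop (sequence : String) : Nat → Int → Bool → List (String × Int) → List (String × Int)
  | 0, _, _, patterns => patterns
  | fuel + 1, length, found, patterns =>
    if found ∧ length ≤ PySem.Int.floordiv (PySem.Str.len sequence) 2 then
      pvBLoop sequence fuel (length + 1)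
        (((((PySem.List.pyRange 0 (PySem.Str.len sequence - length + 1) 1).foldl
            (fun d i => PySem.Dict.modify d (PySem.Str.slice sequence (some i) (some (i + length))) []
              (· ++ [i])) (PySem.Dict.empty : PySem.Dict String (List Int))).items).foldl
            (pvBItem length) (false, patterns)).1)
        (((((PySem.List.pyRange 0 (PySem.Str.len sequence - length + 1) 1).foldl
            (fun d i => PySem.Dict.modify d (PySem.Str.slice sequence (some i) (some (i + length))) []
              (· ++ [i])) (PySem.Dict.empty : PySem.Dict String (List Int))).items).foldl
            (pvBItem length) (false, patterns)).2)
    else patterns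

def find_repeating_patterns_alt (sequence : String) (min_length : Int) : List (String × Int) :=
  pvBLoop sequence (PySem.Int.floordiv (PySem.Str.len sequence) 2 - min_length + 1).toNat
    min_length true []

-- ===== PRECONDITION & SPEC =====
-- Pre_ excludes negative min_length, outside the task's natural domain: there the slice
-- end i+length is a negative index that wraps around, so the windows A slices are not windows of
-- that length at all and no per-length grouping of fixed-size windows can match them.
def Pre_find_repeating_patterns (sequence : String) (min_length : Int) : Prop :=
  0 ≤ min_length
instance (sequence : String) (min_length : Int) : Decidable (Pre_find_repeating_patterns sequence min_length) := by unfold Pre_find_repeating_patterns; infer_instance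

def pvWitness_find_repeating_patterns : String × Int := ("abab", 2)

def Spec_find_repeating_patterns (sequence : String) (min_length : Int) (out : List (String × Int)) : Prop := out = find_repeating_patterns_alt sequence min_length
instance (sequence : String) (min_length : Int) (out : List (String × Int)) : Decidable (Spec_find_repeating_patterns sequence min_length out) := by unfold Spec_find_repeating_patterns; infer_instance

-- ===== CLAIM (what is proved, stated in full; the proofs are below) =====
def Claim_equal_find_repeating_patterns : Prop := ∀ (sequence : String) (min_length : Int), Dom_find_repeating_patterns sequence min_length → Pre_find_repeating_patterns sequence min_length → Spec_find_repeating_patterns sequence min_length (find_repeating_patterns sequence min_length)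

-- ===== LEMMAS AND PROOFS =====

-- the window of length L starting at i
def pvWin (cs : List Char) (L i : Nat) : List Char := (cs.drop i).take L

-- fueled greedy non-overlapping count from position k (mirrors PySem.Chars.count.go)
def pvGCnt (cs sub : List Char) : Nat → Nat → Nat
  | 0, _ => 0
  | fuel + 1, k =>
    if k < cs.length then
      (if sub.isPrefixOf (cs.drop k) then 1 + pvGCnt cs sub fuel (k + sub.length)
       else pvGCnt cs sub fuel (k + 1))
    else 0

-- greedy count scanning window indices j, j+1, … (t of them) with free bound f
def pvGFrom (cs sub : List Char) : Nat → Nat → Int → Nat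
  | 0, _, _ => 0
  | t + 1, j, f =>
    if pvWin cs sub.length j = sub then
      (if f ≤ (j : Int) then 1 + pvGFrom cs sub t (j + 1) ((j : Int) + sub.length)
       else pvGFrom cs sub t (j + 1) f)
    else pvGFrom cs sub t (j + 1) f

-- first-occurrence-distinct elements of ps not already in seen (order preserved)
def pvFresh (ps : List String) (seen : PySem.Set String) : List String :=
  match ps with
  | [] => []
  | p :: ps => if seen.contains p then pvFresh ps seen else p :: pvFresh ps (seen.add p)

-- what A appends for one distinct window
def pvGA (sequence : String) (p : String) : Option (String × Int) :=
  if 1 < PySem.Str.count sequence p then some (p, (PySem.Str.count sequence p : Int)) else none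

-- what B appends for one dict item
def pvGB (length : Int) (p : String × List Int) : Option (String × Int) :=
  if 1 < (p.2.foldl (pvBGreedy length) (0, 0)).1 then some (p.1, (p.2.foldl (pvBGreedy length) (0, 0)).1)
  else none

def pvSliceF (sequence : String) (length : Int) (i : Int) : String :=
  PySem.Str.slice sequence (some i) (some (i + length))

-- A's inner-loop body as a function of the window string itself
def pvAStep (sequence : String) (st : Bool × PySem.Set String × List (String × Int))
    (p : String) : Bool × PySem.Set String × List (String × Int) :=
  if st.2.1.contains p then st
  else
    if 1 < PySem.Str.count sequence p then
      (true, st.2.1.add p, st.2.2 ++ [(p, (PySem.Str.count sequence p : Int))])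
    else (st.1, st.2.1.add p, st.2.2)

theorem pvGCnt_congr (cs sub : List Char) (hL : sub ≠ []) :
    ∀ fuel1 fuel2 k, cs.length - k ≤ fuel1 → cs.length - k ≤ fuel2 →
    pvGCnt cs sub fuel1 k = pvGCnt cs sub fuel2 k := by
  intro fuel1
  induction fuel1 with
  | zero =>
    intro fuel2 k h1 h2
    cases fuel2 with
    | zero => rfl
    | succ f2 => simp [pvGCnt]; intro hk; omega
  | succ f1 ih =>
    intro fuel2 k h1 h2
    cases fuel2 with
    | zero => simp [pvGCnt]; intro hk; omega
    | succ f2 =>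
      simp only [pvGCnt]
      split
      · have hL1 : 1 ≤ sub.length := by cases sub with | nil => simp at hL | cons a t => simp
        split
        · rw [ih f2 (k + sub.length) (by omega) (by omega)]
        · rw [ih f2 (k + 1) (by omega) (by omega)]
      · rfl

theorem pvCountGo (cs sub : List Char) :
    ∀ fuel k acc, PySem.Chars.count.go sub fuel (cs.drop k) acc = acc + pvGCnt cs sub fuel k := by
  intro fuel
  induction fuel with
  | zero => intro k acc; simp [PySem.Chars.count.go, pvGCnt]
  | succ f ih =>
    intro k acc
    by_cases hk : k < cs.length
    · obtain ⟨h, t, hd⟩ : ∃ h t, cs.drop k = h :: t := by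
        cases hcs : cs.drop k with
        | nil => exfalso; have := List.drop_eq_nil_iff.mp hcs; omega
        | cons a b => exact ⟨a, b, rfl⟩
      rw [hd]
      simp only [PySem.Chars.count.go]
      rw [← hd]
      simp only [pvGCnt, if_pos hk]
      split
      · have : List.drop sub.length (cs.drop k) = cs.drop (k + sub.length) := by
          rw [List.drop_drop]
        rw [this, ih]; omega
      · have ht : t = cs.drop (k + 1) := by
          rw [← List.tail_drop, hd]; rfl
        rw [ht, ih]
    · have hd : cs.drop k = [] := List.drop_eq_nil_iff.mpr (by omega)
      rw [hd]
      simp only [PySem.Chars.count.go]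
      simp [pvGCnt, hk]

theorem pvFoldlGFrom (cs sub : List Char) :
    ∀ t j (c f : Int),
    ((List.range' j t).foldl
      (fun st i => if pvWin cs sub.length i = sub then pvBGreedy (sub.length : Int) st (i : Int) else st)
      (c, f)).1 = c + pvGFrom cs sub t j f := by
  intro t
  induction t with
  | zero => intro j c f; simp [pvGFrom]
  | succ t ih =>
    intro j c f
    rw [List.range'_succ]
    simp only [List.foldl_cons]
    by_cases hw : pvWin cs sub.length j = sub
    · rw [if_pos hw]
      by_cases hf : f ≤ (j : Int)
      · have hb : pvBGreedy (sub.length : Int) (c, f) (j : Int) = (c + 1, (j : Int) + sub.length) := by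
          simp [pvBGreedy, hf]
        rw [hb, ih, pvGFrom, if_pos hw, if_pos hf]
        push_cast; ring
      · have hb : pvBGreedy (sub.length : Int) (c, f) (j : Int) = (c, f) := by
          simp [pvBGreedy, hf]
        rw [hb, ih, pvGFrom, if_pos hw, if_neg hf]
    · rw [if_neg hw, ih, pvGFrom, if_neg hw]

-- no occurrence at or beyond n - L + 1

theorem pvGCnt_high (cs sub : List Char) (hL : sub ≠ []) :
    ∀ fuel k, cs.length + 1 ≤ k + sub.length → pvGCnt cs sub fuel k = 0 := by
  intro fuel
  induction fuel with
  | zero => intro k h; rfl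
  | succ f ih =>
    intro k h
    simp only [pvGCnt]
    split
    · have hnp : ¬ sub.isPrefixOf (List.drop k cs) = true := by
        intro hp
        have := (List.isPrefixOf_iff_prefix.mp hp).length_le
        simp [List.length_drop] at this
        omega
      rw [if_neg hnp]
      exact ih (k + 1) (by omega)
    · rfl

theorem pvGFrom_eq_pvGCnt (cs sub : List Char) (hL : sub ≠ []) (hLn : sub.length ≤ cs.length) :
    ∀ t j (f : Nat), j + t = cs.length - sub.length + 1 →
    pvGFrom cs sub t j (f : Int) = pvGCnt cs sub (t + sub.length) (max j f) := by
  have hL1 : 1 ≤ sub.length := by cases sub with | nil => simp at hL | cons a b => simp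
  intro t
  induction t with
  | zero =>
    intro j f hj
    rw [pvGFrom, pvGCnt_high cs sub hL _ _ (by omega)]
  | succ t ih =>
    intro j f hj
    have hjn : j + sub.length ≤ cs.length := by omega
    have hwin : (pvWin cs sub.length j = sub) ↔ sub.isPrefixOf (List.drop j cs) = true := by
      rw [List.isPrefixOf_iff_prefix, List.prefix_iff_eq_take]
      unfold pvWin
      exact eq_comm
    by_cases hf : j < f
    · -- index j is skipped: free is ahead
      have hnf : ¬ ((f : Int) ≤ (j : Int)) := by push_cast; omega
      have hmax1 : max (j + 1) f = f := by omega
      have hmax2 : max j f = f := by omega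
      rw [pvGFrom, if_neg hnf, ite_self, ih (j + 1) f (by omega), hmax1, hmax2]
      exact pvGCnt_congr cs sub hL _ _ f (by omega) (by omega)
    · have hmax : max j f = j := by omega
      rw [hmax]
      have hff : ((f : Int) ≤ (j : Int)) := by push_cast; omega
      rw [pvGFrom]
      by_cases hw : pvWin cs sub.length j = sub
      · rw [if_pos hw, if_pos hff]
        have hstep : pvGCnt cs sub (t + sub.length + 1) j
            = 1 + pvGCnt cs sub (t + sub.length) (j + sub.length) := by
          rw [pvGCnt, if_pos (by omega : j < cs.length), if_pos (hwin.mp hw)]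
        rw [show t + 1 + sub.length = t + sub.length + 1 from by omega, hstep]
        have hc : ((j : Int) + (sub.length : Int)) = ((j + sub.length : Nat) : Int) := by push_cast; ring
        rw [hc, ih (j + 1) (j + sub.length) (by omega)]
        rw [show max (j + 1) (j + sub.length) = j + sub.length from by omega]
      · rw [if_neg hw]
        have hnp : ¬ sub.isPrefixOf (List.drop j cs) = true := fun hp => hw (hwin.mpr hp)
        have hstep : pvGCnt cs sub (t + sub.length + 1) j
            = pvGCnt cs sub (t + sub.length) (j + 1) := by
          rw [pvGCnt, if_pos (by omega : j < cs.length), if_neg hnp]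
        rw [show t + 1 + sub.length = t + sub.length + 1 from by omega, hstep]
        rw [ih (j + 1) f (by omega)]
        rw [show max (j + 1) f = j + 1 from by omega]

theorem pvGFrom_nil (cs : List Char) :
    ∀ t (j : Nat) (f : Int), f ≤ (j : Int) → pvGFrom cs [] t j f = t := by
  intro t
  induction t with
  | zero => intro j f hf; rfl
  | succ t ih =>
    intro j f hf
    rw [pvGFrom]
    have hw : pvWin cs ([] : List Char).length j = [] := by simp [pvWin]
    rw [if_pos hw, if_pos hf, ih (j + 1) _ (by push_cast [List.length_nil]; omega)]
    omega

theorem pvCore (cs sub : List Char) (hLn : sub.length ≤ cs.length) :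
    ((((List.range (cs.length - sub.length + 1)).filter
        (fun i => decide (pvWin cs sub.length i = sub))).map (fun (i : Nat) => (i : Int))).foldl
      (pvBGreedy (sub.length : Int)) (0, 0)).1
    = (PySem.Chars.count cs sub : Int) := by
  simp only [List.foldl_map, List.foldl_filter, decide_eq_true_eq]
  rw [List.range_eq_range', pvFoldlGFrom]
  by_cases hs : sub = []
  · subst hs
    rw [show ((0 : Int) = ((0 : Nat) : Int)) from rfl, pvGFrom_nil cs _ 0 _ (by simp)]
    simp [PySem.Chars.count]
  · rw [show ((0 : Int) = ((0 : Nat) : Int)) from rfl,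
      pvGFrom_eq_pvGCnt cs sub hs hLn _ 0 0 (by omega)]
    have hcount : PySem.Chars.count cs sub = pvGCnt cs sub cs.length 0 := by
      unfold PySem.Chars.count
      rw [if_neg (by simpa using hs)]
      simpa using pvCountGo cs sub cs.length 0 0
    rw [hcount]
    norm_cast
    rw [show max 0 0 = 0 from rfl]
    rw [Nat.zero_add]
    exact pvGCnt_congr cs sub hs (cs.length - sub.length + 1 + sub.length) cs.length 0 (by omega) (by omega)

-- ===== ports (dev copies) =====

theorem pvLemA (sequence : String) :
    ∀ (ps : List String) (f0 : Bool) (seen : PySem.Set String) (pat0 : List (String × Int)),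
    ps.foldl (pvAStep sequence) (f0, seen, pat0)
      = (f0 || !((pvFresh ps seen).filterMap (pvGA sequence)).isEmpty,
         PySem.Set.update seen ps,
         pat0 ++ (pvFresh ps seen).filterMap (pvGA sequence)) := by
  intro ps
  induction ps with
  | nil => intro f0 seen pat0; simp [pvFresh, PySem.Set.update]
  | cons p ps ih =>
    intro f0 seen pat0
    rw [List.foldl_cons]
    by_cases hc : p ∈ seen
    · have hstep : pvAStep sequence (f0, seen, pat0) p = (f0, seen, pat0) := by
        simp [pvAStep, hc]
      have hupd : PySem.Set.update seen (p :: ps) = PySem.Set.update seen ps := by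
        simp [PySem.Set.update, PySem.Set.add, hc]
      rw [hstep, ih, hupd]
      simp [pvFresh, hc]
    · have hupd : PySem.Set.update seen (p :: ps) = PySem.Set.update (seen.add p) ps := by
        simp [PySem.Set.update]
      have hfr : pvFresh (p :: ps) seen = p :: pvFresh ps (seen.add p) := by
        simp [pvFresh, hc]
      by_cases hcount : 1 < PySem.Chars.count sequence.toList p.toList
      · have hstep : pvAStep sequence (f0, seen, pat0) p
            = (true, seen.add p, pat0 ++ [(p, (PySem.Str.count sequence p : Int))]) := by
          simp [pvAStep, hc, hcount]
        have hga : pvGA sequence p = some (p, (PySem.Str.count sequence p : Int)) := by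
          simp [pvGA, hcount]
        rw [hstep, ih, hupd, hfr]
        simp [hga]
      · have hstep : pvAStep sequence (f0, seen, pat0) p = (f0, seen.add p, pat0) := by
          simp [pvAStep, hc, hcount]
        have hga : pvGA sequence p = none := by simp [pvGA, hcount]
        rw [hstep, ih, hupd, hfr]
        simp [hga]

theorem pvLemB (length : Int) :
    ∀ (its : List (String × List Int)) (f0 : Bool) (pat0 : List (String × Int)),
    its.foldl (pvBItem length) (f0, pat0)
      = (f0 || !(its.filterMap (pvGB length)).isEmpty, pat0 ++ its.filterMap (pvGB length)) := by
  intro its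
  induction its with
  | nil => intro f0 pat0; simp
  | cons p its ih =>
    intro f0 pat0
    rw [List.foldl_cons]
    by_cases hg : 1 < (p.2.foldl (pvBGreedy length) (0, 0)).1
    · have hstep : pvBItem length (f0, pat0) p
          = (true, pat0 ++ [(p.1, (p.2.foldl (pvBGreedy length) (0, 0)).1)]) := by
        simp [pvBItem, hg]
      have hgb : pvGB length p = some (p.1, (p.2.foldl (pvBGreedy length) (0, 0)).1) := by
        simp [pvGB, hg]
      rw [hstep, ih]
      simp [hgb]
    · have hstep : pvBItem length (f0, pat0) p = (f0, pat0) := by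
        simp [pvBItem, hg]
      have hgb : pvGB length p = none := by simp [pvGB, hg]
      rw [hstep, ih]
      simp [hgb]

theorem pvFresh_update :
    ∀ (ps : List String) (seen : PySem.Set String),
    PySem.Set.update seen ps = seen ++ pvFresh ps seen := by
  intro ps
  induction ps with
  | nil => intro seen; simp [pvFresh, PySem.Set.update]
  | cons p ps ih =>
    intro seen
    by_cases hc : p ∈ seen
    · have : PySem.Set.update seen (p :: ps) = PySem.Set.update seen ps := by
        simp [PySem.Set.update, PySem.Set.add, hc]
      rw [this, ih]
      simp [pvFresh, hc]
    · have h1 : PySem.Set.update seen (p :: ps) = PySem.Set.update (seen.add p) ps := by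
        simp [PySem.Set.update]
      have h2 : seen.add p = seen ++ [p] := by simp [PySem.Set.add, hc]
      rw [h1, ih, h2]
      simp [pvFresh, hc]

theorem pvFresh_subset :
    ∀ (ps : List String) (seen : PySem.Set String) (x : String),
    x ∈ pvFresh ps seen → x ∈ ps := by
  intro ps
  induction ps with
  | nil => intro seen x hx; simp [pvFresh] at hx
  | cons p ps ih =>
    intro seen x hx
    rw [pvFresh] at hx
    by_cases hc : p ∈ seen
    · rw [if_pos (by simp [hc] : seen.contains p = true)] at hx
      exact List.mem_cons_of_mem _ (ih seen x hx)
    · rw [if_neg (by simp [hc] : ¬ seen.contains p = true)] at hx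
      rcases List.mem_cons.mp hx with h | h
      · exact h ▸ List.mem_cons_self
      · exact List.mem_cons_of_mem _ (ih _ x h)

theorem pvSliceF_toList (sequence : String) (length : Int) (h0 : 0 ≤ length) (i : Nat) :
    (pvSliceF sequence length (i : Int)).toList = pvWin sequence.toList length.toNat i := by
  unfold pvSliceF pvWin
  rw [PySem.Str.toList_slice]
  rw [show ((i : Int) + length) = ((i + length.toNat : Nat) : Int) from by push_cast; omega]
  rw [PySem.Chars.slice_eq_listSlice, PySem.List.slice_natCast]
  congr 1
  omega

theorem pvInner (sequence : String) (length : Int) (patterns : List (String × Int))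
    (h0 : 0 ≤ length) (hle : length ≤ PySem.Int.floordiv (PySem.Str.len sequence) 2) :
    (((PySem.List.pyRange 0 (PySem.Str.len sequence - length + 1) 1).foldl
        (pvAInner sequence length) (false, PySem.Set.empty, patterns)).1
      = ((((PySem.List.pyRange 0 (PySem.Str.len sequence - length + 1) 1).foldl
          (fun d i => PySem.Dict.modify d (PySem.Str.slice sequence (some i) (some (i + length))) []
            (· ++ [i])) (PySem.Dict.empty : PySem.Dict String (List Int))).items).foldl
          (pvBItem length) (false, patterns)).1)
    ∧ (((PySem.List.pyRange 0 (PySem.Str.len sequence - length + 1) 1).foldl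
        (pvAInner sequence length) (false, PySem.Set.empty, patterns)).2.2
      = ((((PySem.List.pyRange 0 (PySem.Str.len sequence - length + 1) 1).foldl
          (fun d i => PySem.Dict.modify d (PySem.Str.slice sequence (some i) (some (i + length))) []
            (· ++ [i])) (PySem.Dict.empty : PySem.Dict String (List Int))).items).foldl
          (pvBItem length) (false, patterns)).2) := by
  have hL : ((length.toNat : Int)) = length := Int.toNat_of_nonneg h0
  have hLn : length.toNat ≤ sequence.toList.length := by
    rw [PySem.Str.len_eq, PySem.Int.floordiv_eq_ediv_of_pos (by norm_num)] at hle
    omega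
  have hidx : PySem.Str.len sequence - length + 1
      = ((sequence.toList.length - length.toNat + 1 : Nat) : Int) := by
    rw [PySem.Str.len_eq]
    push_cast
    omega
  set cs := sequence.toList with hcs
  set L := length.toNat with hLdef
  set m := cs.length - L + 1 with hm
  rw [hidx, PySem.List.pyRange_zero_natCast]
  simp only [List.foldl_map]
  -- the window list, in index order
  set ps := (List.range m).map (fun (i : Nat) => pvSliceF sequence length (i : Int)) with hps
  -- A side
  have hAside : (List.range m).foldl (fun st (i : Nat) => pvAInner sequence length st (i : Int))
      (false, PySem.Set.empty, patterns) = ps.foldl (pvAStep sequence) (false, PySem.Set.empty, patterns) := by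
    rw [hps, List.foldl_map]
    rfl
  -- B side dict
  set occ := (List.range m).foldl
      (fun d (i : Nat) => PySem.Dict.modify d (PySem.Str.slice sequence (some (i : Int)) (some ((i : Int) + length))) [] (· ++ [(i : Int)]))
      (PySem.Dict.empty : PySem.Dict String (List Int)) with hocc
  have hkeys : occ.keys = PySem.Set.update ([] : List String) ps := by
    rw [hocc, hps]
    have := PySem.Dict.keys_foldl_modify_key (List.range m)
      (fun (i : Nat) => pvSliceF sequence length (i : Int)) ([] : List Int)
      (fun _ (i : Nat) => (· ++ [(i : Int)])) (PySem.Dict.empty : PySem.Dict String (List Int))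
    exact this
  have hnodup : occ.keys.Nodup := by
    rw [hocc]
    exact PySem.Dict.nodup_keys_foldl_modify_key (List.range m)
      (fun (i : Nat) => pvSliceF sequence length (i : Int)) ([] : List Int)
      (fun _ (i : Nat) => (· ++ [(i : Int)])) _ (by simp [PySem.Dict.empty])
  have hgetD : ∀ k : String, occ.getD k []
      = (((List.range m).filter (fun (i : Nat) => pvSliceF sequence length (i : Int) == k)).map
          (fun (i : Nat) => (i : Int))) := by
    intro k
    have hpair : occ = ((List.range m).map
        (fun (i : Nat) => (pvSliceF sequence length (i : Int), (i : Int)))).foldl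
        (fun d p => PySem.Dict.modify d p.1 [] (· ++ [p.2]))
        (PySem.Dict.empty : PySem.Dict String (List Int)) := by
      rw [List.foldl_map, hocc]
      rfl
    rw [hpair, PySem.Dict.getD_foldl_modify_append, List.filter_map, List.map_map]
    simp only [Function.comp_def]
    rfl
  have hitems : occ.items = occ.keys.map (fun k => (k, occ.getD k [])) :=
    PySem.Dict.items_eq_map_keys occ hnodup []
  rw [hAside, pvLemA, hitems, pvLemB, List.filterMap_map, hkeys, pvFresh_update]
  -- it remains to identify the two filterMaps over the fresh window list
  have hmain : (pvFresh ps PySem.Set.empty).filterMap (pvGA sequence)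
      = (pvFresh ps PySem.Set.empty).filterMap ((pvGB length) ∘ (fun k => (k, occ.getD k []))) := by
    apply List.filterMap_congr
    intro k hk
    obtain ⟨i, hi, hik⟩ := List.mem_map.mp (pvFresh_subset ps PySem.Set.empty k hk)
    have him : i < m := List.mem_range.mp hi
    have hwk : k.toList = pvWin cs L i := by
      rw [← hik, pvSliceF_toList sequence length h0 i]
    have hwlen : k.toList.length = L := by
      rw [hwk]
      unfold pvWin
      simp
      omega
    have hfilt : ((List.range m).filter (fun (i : Nat) => pvSliceF sequence length (i : Int) == k))
        = ((List.range m).filter (fun (i : Nat) => decide (pvWin cs L i = k.toList))) := by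
      apply List.filter_congr
      intro j hj
      by_cases h2 : pvWin cs L j = k.toList
      · have he : pvSliceF sequence length (j : Int) = k := by
          apply String.ext
          rw [pvSliceF_toList sequence length h0 j, h2]
        simp [he, h2]
      · have he : pvSliceF sequence length (j : Int) ≠ k := by
          intro he
          exact h2 (by rw [← pvSliceF_toList sequence length h0 j, he])
        simp [he, h2]
    have hcore := pvCore cs k.toList (by omega)
    rw [hwlen] at hcore
    have hgb : (pvGB length) ((fun k => (k, occ.getD k [])) k)
        = if 1 < PySem.Str.count sequence k then some (k, (PySem.Str.count sequence k : Int)) else none := by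
      show (if 1 < ((occ.getD k []).foldl (pvBGreedy length) (0, 0)).1 then
              some (k, ((occ.getD k []).foldl (pvBGreedy length) (0, 0)).1) else none) = _
      rw [hgetD k, hfilt, hm, ← hL, hcore, PySem.Str.count_eq]
      by_cases hcnt : 1 < PySem.Chars.count cs k.toList
      · simp only [← hcs]
        simp [hcnt]
      · simp only [← hcs]
        simp [hcnt]
    rw [Function.comp_apply]
    rw [show ((fun k => (k, occ.getD k [])) k) = (k, occ.getD k []) from rfl] at hgb
    rw [show ((k, occ.getD k []) : String × List Int) = (k, occ.getD k []) from rfl, hgb]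
    unfold pvGA
    rfl
  rw [hmain, show PySem.Set.update ([] : List String) ps = pvFresh ps PySem.Set.empty from by
    rw [pvFresh_update]
    rfl]
  exact ⟨rfl, rfl⟩

theorem pvALoop_eq_pvBLoop (sequence : String) :
    ∀ (fuel : Nat) (length : Int) (found : Bool) (patterns : List (String × Int)),
    0 ≤ length → pvALoop sequence fuel length found patterns = pvBLoop sequence fuel length found patterns := by
  intro fuel
  induction fuel with
  | zero => intro length found patterns h0; rfl
  | succ fuel ih =>
    intro length found patterns h0
    rw [pvALoop, pvBLoop]
    by_cases h : (found : Prop) ∧ length ≤ PySem.Int.floordiv (PySem.Str.len sequence) 2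
    · rw [if_pos h, if_pos h]
      obtain ⟨hf, hle⟩ := h
      obtain ⟨h1, h2⟩ := pvInner sequence length patterns h0 hle
      rw [h1, h2]
      exact ih (length + 1) _ _ (by omega)
    · rw [if_neg h, if_neg h]

-- ===== VERDICT (by name: the statement is the Claim_ definition above) =====
theorem find_repeating_patterns_spec : Claim_equal_find_repeating_patterns := by
  intro sequence min_length _ hpre
  show find_repeating_patterns sequence min_length = find_repeating_patterns_alt sequence min_length
  unfold find_repeating_patterns find_repeating_patterns_alt
  exact pvALoop_eq_pvBLoop sequence _ min_length true [] hpre
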